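-- pv_equiv track=rewrite | github.com/kriskruse/Random_code | Random scripts/LeetCode.py | solve
-- ===== SOURCE A (Python) =====
-- def solve(a, k, c):
--     i = 0
--     j = 0
--     cnt = 0
--     n = len(a)
--     ans = 0
--
--     while (j < n):
--         if a[j] == c:
--             cnt += 1
--         while i < n and cnt > k:
--             if a[i] == c:
--                 cnt -= 1
--             i += 1
--         ans = max(j - i + 1, ans)
--         j += 1
--
--     return ans
-- ===== SOURCE B (Python) =====
-- def solve(a, k, c):
--     if k < 0:
--         return 0
--     n = len(a)
--     p = [i for i, x in enumerate(a) if x == c]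
--     m = len(p)
--     if m <= k:
--         return n
--     q = [-1] + p + [n]
--     best = 0
--     for t in range(m - k + 1):
--         best = max(best, q[t + k + 1] - q[t] - 1)
--     return best
-- ===== Notes on version B (the rewrite author's own statement) =====
-- stated objective: faster
-- what changed: A's two-pointer sliding window (nested while loops maintaining a running count) is replaced by a closed-form scan: collect the occurrence positions of c, return n if there are at most k of them (and 0 for k < 0), else take the maximum window length q[t+k+1]-q[t]-1 over the position list with -1/n sentinels.
import Mathlib
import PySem

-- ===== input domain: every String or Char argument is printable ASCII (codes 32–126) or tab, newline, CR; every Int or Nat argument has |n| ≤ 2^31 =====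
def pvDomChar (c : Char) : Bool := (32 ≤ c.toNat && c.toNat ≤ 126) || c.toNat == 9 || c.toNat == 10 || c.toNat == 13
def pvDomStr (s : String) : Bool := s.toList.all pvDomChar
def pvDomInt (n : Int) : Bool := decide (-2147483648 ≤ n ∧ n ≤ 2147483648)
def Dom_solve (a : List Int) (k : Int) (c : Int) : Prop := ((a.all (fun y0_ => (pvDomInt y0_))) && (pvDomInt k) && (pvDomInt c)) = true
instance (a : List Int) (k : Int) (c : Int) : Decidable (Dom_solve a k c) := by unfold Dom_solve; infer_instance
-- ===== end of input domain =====

-- B replaces A's two-pointer sliding window by a closed-form scan over the occurrence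
-- positions of c (with -1/n sentinels); same O(n) asymptotics, measured constant-factor speedup.

-- ===== PORT A =====
-- inner 'while i < n and cnt > k' loop; fuel = len(a) suffices since i increases each step
def solveInner (a : List Int) (k c : Int) : Nat → Int → Int → Int × Int
  | 0, i, cnt => (i, cnt)
  | fuel+1, i, cnt =>
    if i < (a.length : Int) ∧ k < cnt then
      -- a[i] is in range whenever the guard holds, so .getD 0 is never used
      solveInner a k c fuel (i+1) (if (PySem.List.pyGet? a i).getD 0 = c then cnt - 1 else cnt)
    else (i, cnt)

-- outer 'while j < n' loop; fuel = len(a)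
def solveOuter (a : List Int) (k c : Int) : Nat → Int → Int → Int → Int → Int
  | 0, _i, _j, _cnt, ans => ans
  | fuel+1, i, j, cnt, ans =>
    if j < (a.length : Int) then
      let cnt1 := if (PySem.List.pyGet? a j).getD 0 = c then cnt + 1 else cnt
      let st := solveInner a k c a.length i cnt1
      solveOuter a k c fuel st.1 (j+1) st.2 (max (j - st.1 + 1) ans)
    else ans

def solve (a : List Int) (k : Int) (c : Int) : Int :=
  solveOuter a k c a.length 0 0 0 0

-- ===== PORT B =====
def solve_alt (a : List Int) (k : Int) (c : Int) : Int :=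
  if k < 0 then 0
  else
    let n := a.length
    let p := ((PySem.List.enumerate a 0).filter (fun ix => ix.2 == c)).map (fun ix => ix.1)
    let m := p.length
    if (m : Int) ≤ k then (n : Int)
    else
      -- q[t] for t : Nat; k ≥ 0 here so indexing by t + k + 1 uses k.toNat
      let q := (-1 : Int) :: p ++ [(n : Int)]
      (List.range (m - k.toNat + 1)).foldl
        (fun best t => max best (q.getD (t + k.toNat + 1) 0 - q.getD t 0 - 1)) 0

-- ===== PRECONDITION & SPEC =====
def Spec_solve (a : List Int) (k : Int) (c : Int) (out : Int) : Prop := out = solve_alt a k c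
instance (a : List Int) (k : Int) (c : Int) (out : Int) : Decidable (Spec_solve a k c out) := by unfold Spec_solve; infer_instance

-- ===== CLAIM (what is proved, stated in full; the proofs are below) =====
def Claim_equal_solve : Prop := ∀ (a : List Int) (k : Int) (c : Int), Dom_solve a k c → Spec_solve a k c (solve a k c)

-- ===== LEMMAS AND PROOFS =====

-- number of occurrences of c among the first j elements of a
def cntc (a : List Int) (c : Int) (j : Nat) : Nat := (a.take j).count c

-- the occurrence positions of c in a, as naturals, in increasing order
def posN (c : Int) : List Int → List Nat
  | [] => []
  | x :: a => if x = c then 0 :: (posN c a).map (· + 1) else (posN c a).map (· + 1)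

theorem cntc_zero (a : List Int) (c : Int) : cntc a c 0 = 0 := by simp [cntc]

theorem cntc_succ (a : List Int) (c : Int) (j : Nat) (h : j < a.length) :
    cntc a c (j+1) = cntc a c j + (if a[j] = c then 1 else 0) := by
  rw [cntc, cntc, List.take_add_one, List.getElem?_eq_getElem h, List.count_append]
  simp [List.count_singleton, beq_iff_eq]

theorem cntc_mono (a : List Int) (c : Int) {i j : Nat} (h : i ≤ j) :
    cntc a c i ≤ cntc a c j := by
  have : a.take i = (a.take j).take i := by rw [List.take_take, Nat.min_eq_left h]
  rw [cntc, cntc, this]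
  exact (List.take_sublist _ _).count_le _

theorem cntc_le_len (a : List Int) (c : Int) (j : Nat) :
    cntc a c j ≤ cntc a c a.length := by
  rcases le_or_gt j a.length with h | h
  · exact cntc_mono a c h
  · rw [cntc, cntc, List.take_of_length_le h.le, List.take_length]

theorem cntc_cons_succ (x : Int) (a : List Int) (c : Int) (j : Nat) :
    cntc (x :: a) c (j+1) = (if x = c then 1 else 0) + cntc a c j := by
  simp [cntc, List.take_succ_cons, List.count_cons, beq_iff_eq]
  split_ifs <;> omega

-- existence witness for Nat.find below: i = len(a) always satisfies the property
theorem lf_ex (a : List Int) (c k : Int) (j : Nat) :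
    ∃ i, ((cntc a c j : Int) ≤ (cntc a c i : Int) + k ∨ i = a.length) :=
  ⟨a.length, Or.inr rfl⟩

-- the index A's inner loop drives i to, at outer step j: the least i such that the
-- window a[i:j] contains at most k occurrences of c (or i = len(a) if none)
def Lf (a : List Int) (c k : Int) (j : Nat) : Nat := Nat.find (lf_ex a c k j)

theorem Lf_le_len (a : List Int) (c k : Int) (j : Nat) : Lf a c k j ≤ a.length :=
  Nat.find_min' _ (Or.inr rfl)

theorem Lf_mono (a : List Int) (c k : Int) (j : Nat) : Lf a c k j ≤ Lf a c k (j+1) := by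
  have h2 : cntc a c j ≤ cntc a c (j+1) := cntc_mono a c (by omega)
  rcases Nat.find_spec (lf_ex a c k (j+1)) with h1 | h1
  · refine Nat.find_min' _ (Or.inl ?_)
    have h1' : (cntc a c (j+1) : Int) ≤ (cntc a c (Lf a c k (j+1)) : Int) + k := h1
    show (cntc a c j : Int) ≤ (cntc a c (Lf a c k (j+1)) : Int) + k
    omega
  · exact Nat.find_min' _ (Or.inr h1)

theorem solveInner_eq (a : List Int) (k c : Int) (J : Nat) :
    ∀ (fuel i : Nat), i ≤ Lf a c k J → a.length - i ≤ fuel →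
      solveInner a k c fuel (i : Int) ((cntc a c J : Int) - (cntc a c i : Int))
        = ((Lf a c k J : Int), (cntc a c J : Int) - (cntc a c (Lf a c k J) : Int)) := by
  intro fuel
  induction fuel with
  | zero =>
    intro i hle hfuel
    have hi : i = Lf a c k J := by
      have := Lf_le_len a c k J
      omega
    subst hi
    rfl
  | succ f ih =>
    intro i hle hfuel
    rcases Nat.lt_or_ge i (Lf a c k J) with hlt | hge
    · -- below the target: the guard holds, take a step
      have hnot := Nat.find_min (lf_ex a c k J) hlt
      have hcnt : ¬ ((cntc a c J : Int) ≤ (cntc a c i : Int) + k) := fun h => hnot (Or.inl h)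
      have hne : i ≠ a.length := fun h => hnot (Or.inr h)
      have hin : i < a.length := by
        have := Lf_le_len a c k J
        omega
      rw [solveInner]
      rw [if_pos ⟨by exact_mod_cast hin, by omega⟩]
      have hget : (PySem.List.pyGet? a (i : Int)).getD 0 = a[i] := by
        rw [PySem.List.pyGet?_natCast, List.getElem?_eq_getElem hin]
        rfl
      have hstep : (if (PySem.List.pyGet? a (i : Int)).getD 0 = c
            then (cntc a c J : Int) - (cntc a c i : Int) - 1
            else (cntc a c J : Int) - (cntc a c i : Int))
          = (cntc a c J : Int) - (cntc a c (i+1) : Int) := by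
        rw [hget, cntc_succ a c i hin]
        split_ifs <;> push_cast <;> omega
      rw [hstep]
      have : ((i : Int) + 1) = ((i + 1 : Nat) : Int) := by push_cast; ring
      rw [this]
      exact ih (i+1) hlt (by omega)
    · -- i = Lf: the guard fails, stop
      have hi : i = Lf a c k J := by omega
      subst hi
      rw [solveInner]
      rw [if_neg]
      have hspec : (cntc a c J : Int) ≤ (cntc a c (Lf a c k J) : Int) + k ∨ Lf a c k J = a.length :=
        Nat.find_spec (lf_ex a c k J)
      rcases hspec with h | h
      · intro hc
        omega
      · intro hc
        have := hc.1
        omega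

theorem solveOuter_succ (a : List Int) (k c : Int) (f : Nat) (i j cnt ans : Int)
    (h : j < (a.length : Int)) :
    solveOuter a k c (f+1) i j cnt ans =
      solveOuter a k c f
        (solveInner a k c a.length i (if (PySem.List.pyGet? a j).getD 0 = c then cnt + 1 else cnt)).1
        (j+1)
        (solveInner a k c a.length i (if (PySem.List.pyGet? a j).getD 0 = c then cnt + 1 else cnt)).2
        (max (j - (solveInner a k c a.length i (if (PySem.List.pyGet? a j).getD 0 = c then cnt + 1 else cnt)).1 + 1) ans) := by
  rw [solveOuter, if_pos h]

theorem solveOuter_eq (a : List Int) (k c : Int) :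
    ∀ (fuel j i : Nat) (ans : Int), j ≤ a.length → a.length - j ≤ fuel →
      (j < a.length → i ≤ Lf a c k (j+1)) →
      solveOuter a k c fuel (i : Int) (j : Int) ((cntc a c j : Int) - (cntc a c i : Int)) ans
        = (List.range' j (a.length - j)).foldl
            (fun acc (t : Nat) => max ((t : Int) - (Lf a c k (t+1) : Int) + 1) acc) ans := by
  intro fuel
  induction fuel with
  | zero =>
    intro j i ans hj hf hi
    have hjn : j = a.length := by omega
    subst hjn
    have h0 : a.length - a.length = 0 := by omega
    rw [h0]
    rfl
  | succ f ih =>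
    intro j i ans hj hf hi
    rcases Nat.lt_or_ge j a.length with hjn | hjn
    · have hc : ((j : Nat) : Int) < (a.length : Int) := by exact_mod_cast hjn
      rw [solveOuter_succ a k c f _ _ _ _ hc]
      have hget : (PySem.List.pyGet? a (j : Int)).getD 0 = a[j] := by
        rw [PySem.List.pyGet?_natCast, List.getElem?_eq_getElem hjn]
        rfl
      have hcnt1 : (if (PySem.List.pyGet? a ((j : Nat) : Int)).getD 0 = c
            then ((cntc a c j : Int) - (cntc a c i : Int)) + 1
            else ((cntc a c j : Int) - (cntc a c i : Int)))
          = (cntc a c (j+1) : Int) - (cntc a c i : Int) := by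
        rw [hget, cntc_succ a c j hjn]
        split_ifs <;> push_cast <;> omega
      rw [hcnt1]
      rw [solveInner_eq a k c (j+1) a.length i (hi hjn) (by omega)]
      have hjcast : ((j : Nat) : Int) + 1 = (((j+1 : Nat)) : Int) := by push_cast; ring
      rw [hjcast]
      rw [ih (j+1) (Lf a c k (j+1)) _ (by omega) (by omega) (fun _ => Lf_mono a c k (j+1))]
      have hrange : a.length - j = (a.length - (j+1)) + 1 := by omega
      rw [hrange, List.range'_succ, List.foldl_cons]
    · have hjn' : j = a.length := by omega
      subst hjn'
      have h0 : a.length - a.length = 0 := by omega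
      rw [h0, solveOuter, if_neg (lt_irrefl _)]
      rfl

theorem solve_eq_fold (a : List Int) (k c : Int) :
    solve a k c = (List.range' 0 a.length).foldl
        (fun acc (t : Nat) => max acc ((t : Int) - (Lf a c k (t+1) : Int) + 1)) 0 := by
  have h := solveOuter_eq a k c a.length 0 0 0 (Nat.zero_le _) (by omega) (fun _ => Nat.zero_le _)
  have e1 : (cntc a c 0 : Int) - (cntc a c 0 : Int) = 0 := by omega
  rw [e1] at h
  have e2 : ((0 : Nat) : Int) = 0 := by norm_num
  rw [e2] at h
  have e3 : a.length - 0 = a.length := by omega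
  rw [e3] at h
  show solveOuter a k c a.length 0 0 0 0 = _
  rw [h]
  have e4 : (fun (acc : Int) (t : Nat) => max ((t : Int) - (Lf a c k (t+1) : Int) + 1) acc)
      = (fun (acc : Int) (t : Nat) => max acc ((t : Int) - (Lf a c k (t+1) : Int) + 1)) := by
    funext acc t
    exact max_comm _ _
  rw [e4]

theorem foldl_max_le {α : Type} (xs : List α) (f : α → Int) (b : Int) :
    ∀ init : Int, init ≤ b → (∀ x ∈ xs, f x ≤ b) →
      xs.foldl (fun acc y => max acc (f y)) init ≤ b := by
  induction xs with
  | nil =>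
    intro init h _
    simpa using h
  | cons x xs ih =>
    intro init hinit hall
    rw [List.foldl_cons]
    exact ih _ (max_le hinit (hall x (by simp))) (fun y hy => hall y (by simp [hy]))


-- ---- B-side: the occurrence list and the sentinel array ----

theorem enum_filter (c : Int) : ∀ (a : List Int) (s : Int),
    (((PySem.List.enumerate a s).filter (fun ix => ix.2 == c)).map (fun ix => ix.1))
      = (posN c a).map (fun (i : Nat) => s + (i : Int)) := by
  intro a
  induction a with
  | nil => intro s; simp [PySem.List.enumerate_nil, posN]
  | cons x a ih =>
    intro s
    rw [PySem.List.enumerate_cons, posN]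
    by_cases hx : x = c
    · have hb : (((s, x) : Int × Int).2 == c) = true := by simp [hx]
      rw [List.filter_cons]
      rw [hb]
      rw [if_pos rfl, List.map_cons, ih (s+1), if_pos hx, List.map_cons, List.map_map]
      refine List.cons_eq_cons.mpr ⟨by norm_num, ?_⟩
      apply List.map_congr_left
      intro i _
      simp
      ring
    · have hb : (((s, x) : Int × Int).2 == c) = false := by simp [hx]
      rw [List.filter_cons]
      rw [hb]
      rw [if_neg (by simp), ih (s+1), if_neg hx, List.map_map]
      apply List.map_congr_left
      intro i _
      simp
      ring

theorem p_eq (a : List Int) (c : Int) :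
    (((PySem.List.enumerate a 0).filter (fun ix => ix.2 == c)).map (fun ix => ix.1))
      = (posN c a).map (fun (i : Nat) => (i : Int)) := by
  rw [enum_filter]
  apply List.map_congr_left
  intro i _
  norm_num

theorem posN_length (c : Int) : ∀ (a : List Int), (posN c a).length = cntc a c a.length := by
  intro a
  induction a with
  | nil => simp [posN, cntc]
  | cons x a ih =>
    rw [posN]
    have hstep := cntc_cons_succ x a c a.length
    by_cases hx : x = c
    · rw [if_pos hx]
      simp only [List.length_cons, List.length_map, ih]
      rw [hstep, if_pos hx]
      omega
    · rw [if_neg hx]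
      simp only [List.length_cons, List.length_map, ih]
      rw [hstep, if_neg hx]
      omega

theorem posN_get (c : Int) : ∀ (a : List Int) (s i : Nat), (posN c a)[s]? = some i →
    i < a.length ∧ cntc a c i = s ∧ cntc a c (i+1) = s + 1 := by
  intro a
  induction a with
  | nil => intro s i h; simp [posN] at h
  | cons x a ih =>
    intro s i h
    rw [posN] at h
    by_cases hx : x = c
    · rw [if_pos hx] at h
      cases s with
      | zero =>
        simp at h
        subst h
        refine ⟨by simp, cntc_zero _ _, ?_⟩
        rw [cntc_cons_succ, if_pos hx, cntc_zero]
      | succ s =>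
        rw [List.getElem?_cons_succ, List.getElem?_map] at h
        cases hg : (posN c a)[s]? with
        | none => rw [hg] at h; simp at h
        | some i0 =>
          rw [hg] at h
          simp at h
          obtain ⟨h1, h2, h3⟩ := ih s i0 hg
          subst h
          refine ⟨by simpa using Nat.succ_lt_succ h1, ?_, ?_⟩
          · rw [cntc_cons_succ, if_pos hx, h2]
            omega
          · rw [cntc_cons_succ, if_pos hx, h3]
            omega
    · rw [if_neg hx, List.getElem?_map] at h
      cases hg : (posN c a)[s]? with
      | none => rw [hg] at h; simp at h
      | some i0 =>
        rw [hg] at h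
        simp at h
        obtain ⟨h1, h2, h3⟩ := ih s i0 hg
        subst h
        refine ⟨by simpa using Nat.succ_lt_succ h1, ?_, ?_⟩
        · rw [cntc_cons_succ, if_neg hx, h2]
          omega
        · rw [cntc_cons_succ, if_neg hx, h3]
          omega

-- the sentinel list q = [-1] + p + [n] of B
def QL (a : List Int) (c : Int) : List Int :=
  (-1 : Int) :: (posN c a).map (fun (i : Nat) => (i : Int)) ++ [(a.length : Int)]

theorem solve_alt_eq (a : List Int) (k c : Int) (h : ¬ k < 0) :
    solve_alt a k c =
      (if ((posN c a).length : Int) ≤ k then (a.length : Int)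
       else (List.range ((posN c a).length - k.toNat + 1)).foldl
          (fun best t => max best ((QL a c).getD (t + k.toNat + 1) 0 - (QL a c).getD t 0 - 1)) 0) := by
  rw [solve_alt, if_neg h]
  simp only [p_eq, List.length_map]
  rfl

theorem QL_zero (a : List Int) (c : Int) : (QL a c).getD 0 0 = -1 := rfl

theorem QL_cnt (a : List Int) (c : Int) (r : Nat) (h1 : 1 ≤ r)
    (h2 : r ≤ (posN c a).length + 1) :
    ∃ jn : Nat, (QL a c).getD r 0 = (jn : Int) ∧ jn ≤ a.length ∧ cntc a c jn = r - 1 ∧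
      (r ≤ (posN c a).length → jn < a.length ∧ cntc a c (jn+1) = r) ∧
      ((posN c a).length < r → jn = a.length) := by
  obtain ⟨s, rfl⟩ : ∃ s, r = s + 1 := ⟨r - 1, by omega⟩
  rcases Nat.lt_or_ge s (posN c a).length with hs | hs
  · have hg : (posN c a)[s]? = some ((posN c a)[s]'hs) := List.getElem?_eq_getElem hs
    obtain ⟨ha1, ha2, ha3⟩ := posN_get c a s _ hg
    refine ⟨(posN c a)[s]'hs, ?_, by omega, by simpa using ha2, fun _ => ⟨ha1, by simpa using ha3⟩,
      fun hlt => absurd hlt (by omega)⟩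
    show ((-1 : Int) :: ((posN c a).map (fun (i : Nat) => (i : Int)) ++ [(a.length : Int)])).getD (s+1) 0 = _
    rw [List.getD_cons_succ, List.getD_eq_getElem?_getD, List.getElem?_append_left (by simpa using hs),
      List.getElem?_map, hg]
    rfl
  · have hs' : s = (posN c a).length := by omega
    subst hs'
    refine ⟨a.length, ?_, le_rfl, ?_, by omega, fun _ => rfl⟩
    · show ((-1 : Int) :: ((posN c a).map (fun (i : Nat) => (i : Int)) ++ [(a.length : Int)])).getD ((posN c a).length + 1) 0 = _
      rw [List.getD_cons_succ, List.getD_eq_getElem?_getD]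
      have hl : ((posN c a).map (fun (i : Nat) => (i : Int))).length = (posN c a).length := by simp
      rw [← hl, List.getElem?_concat_length]
      rfl
    · rw [posN_length]
      omega

theorem QL_ge (a : List Int) (c : Int) (s : Nat) (hs : s ≤ (posN c a).length + 1) :
    -1 ≤ (QL a c).getD s 0 := by
  cases s with
  | zero => rw [QL_zero]
  | succ s =>
    obtain ⟨jn, hq, _⟩ := QL_cnt a c (s+1) (by omega) hs
    rw [hq]
    omega

-- the least-index function of A's loop, written with B's sentinel array
theorem Lf_formula (a : List Int) (k c : Int) (hk : 0 ≤ k) (j : Nat) (_hj : j ≤ a.length) :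
    ((Lf a c k j : Nat) : Int) = (QL a c).getD (cntc a c j - k.toNat) 0 + 1 := by
  have hkn : ((k.toNat : Nat) : Int) = k := Int.toNat_of_nonneg hk
  rcases Nat.eq_zero_or_pos (cntc a c j - k.toNat) with hs | hs
  · rw [hs, QL_zero]
    have h0 : Lf a c k j = 0 := by
      have hle : Lf a c k j ≤ 0 := Nat.find_min' _ (Or.inl (by
        rw [cntc_zero]
        push_cast
        omega))
      omega
    rw [h0]
    norm_num
  · set s := cntc a c j - k.toNat with hsdef
    have hcj : cntc a c j = s + k.toNat := by omega
    have hsm : s ≤ (posN c a).length := by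
      have := cntc_le_len a c j
      rw [posN_length]
      omega
    obtain ⟨jn, hq, hjle, hcnt, hmore, _⟩ := QL_cnt a c s (by omega) (by omega)
    obtain ⟨hjlt, hcnt1⟩ := hmore hsm
    rw [hq]
    have hLf : Lf a c k j = jn + 1 := by
      rw [Lf, Nat.find_eq_iff]
      constructor
      · left
        rw [hcnt1]
        omega
      · intro i hi hp
        rcases hp with hp | hp
        · have : cntc a c i ≤ cntc a c jn := cntc_mono a c (by omega)
          omega
        · omega
    rw [hLf]
    push_cast
    omega

theorem j_le_Q (a : List Int) (k c : Int) (_hk : 0 ≤ k) (hm : k.toNat < (posN c a).length)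
    (j : Nat) (hj : j ≤ a.length) :
    (j : Int) ≤ (QL a c).getD ((cntc a c j - k.toNat) + k.toNat + 1) 0 := by
  set s := cntc a c j - k.toNat with hsdef
  have hcj : cntc a c j ≤ s + k.toNat := by omega
  have hsm : s ≤ (posN c a).length - k.toNat := by
    have := cntc_le_len a c j
    rw [posN_length]
    omega
  obtain ⟨jn, hq, hjle, hcnt, hmore, hlast⟩ := QL_cnt a c (s + k.toNat + 1) (by omega) (by omega)
  rw [hq]
  rcases Nat.lt_or_ge (s + k.toNat) (posN c a).length with hr | hr
  · obtain ⟨_, hcnt1⟩ := hmore (by omega)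
    by_contra hgt
    have hjn1 : jn + 1 ≤ j := by omega
    have := cntc_mono a c hjn1
    omega
  · have hjn : jn = a.length := hlast (by omega)
    omega


theorem foldl_congr_mem' {α β : Type} : ∀ (l : List α) (f g : β → α → β) (b : β),
    (∀ bb x, x ∈ l → f bb x = g bb x) → l.foldl f b = l.foldl g b := by
  intro l
  induction l with
  | nil => intros; rfl
  | cons x l ih =>
    intro f g b h
    rw [List.foldl_cons, List.foldl_cons, h b x (by simp)]
    exact ih f g _ (fun bb y hy => h bb y (by simp [hy]))

theorem fold_max_succ : ∀ (n : Nat) (z : Int), 0 ≤ z →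
    (List.range' 0 n).foldl (fun acc (t : Nat) => max acc ((t : Int) + 1)) z = max z n := by
  intro n
  induction n with
  | zero =>
    intro z hz
    simp only [List.range'_zero, List.foldl_nil, Nat.cast_zero]
    rw [max_eq_left hz]
  | succ n ih =>
    intro z hz
    rw [List.range'_concat, List.foldl_append, ih z hz, List.foldl_cons, List.foldl_nil]
    simp only [Nat.zero_add]
    rw [max_def, max_def, max_def]
    split_ifs <;> push_cast at * <;> omega

theorem main_eq (a : List Int) (k : Int) (c : Int) : solve a k c = solve_alt a k c := by
  rw [solve_eq_fold]
  by_cases hk : k < 0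
  · -- k < 0: every window length recorded by A is ≤ 0, so both sides are 0
    rw [solve_alt, if_pos hk]
    have hub : ∀ t ∈ List.range' 0 a.length, (t : Int) - (Lf a c k (t+1) : Int) + 1 ≤ 0 := by
      intro t ht
      have htn : t < a.length := by
        have := List.mem_range'_1.mp ht
        omega
      rcases Nat.lt_or_ge (Lf a c k (t+1)) (t+1) with hlt | hge
      · exfalso
        have hmono := cntc_mono a c (by omega : Lf a c k (t+1) ≤ t+1)
        have hspec : (cntc a c (t+1) : Int) ≤ (cntc a c (Lf a c k (t+1)) : Int) + k ∨
            Lf a c k (t+1) = a.length := Nat.find_spec (lf_ex a c k (t+1))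
        rcases hspec with h | h
        · omega
        · omega
      · omega
    have h1 := foldl_max_le (List.range' 0 a.length)
      (fun t => (t : Int) - (Lf a c k (t+1) : Int) + 1) 0 0 le_rfl hub
    have h2 := (PySem.List.le_foldl_max_int (List.range' 0 a.length)
      (fun t => (t : Int) - (Lf a c k (t+1) : Int) + 1) 0).1
    exact le_antisymm h1 h2
  · have hk0 : 0 ≤ k := by omega
    have hkn : ((k.toNat : Nat) : Int) = k := Int.toNat_of_nonneg hk0
    rw [solve_alt_eq a k c hk]
    by_cases hm : ((posN c a).length : Int) ≤ k
    · -- every element fits: Lf is constantly 0 and A's maximum is n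
      rw [if_pos hm]
      have hml : ((posN c a).length : Nat) = cntc a c a.length := posN_length c a
      have hLf : ∀ j : Nat, Lf a c k j = 0 := by
        intro j
        have h0 : Lf a c k j ≤ 0 := Nat.find_min' _ (Or.inl (by
          rw [cntc_zero]
          have hle := cntc_le_len a c j
          push_cast
          omega))
        omega
      have hcong : (List.range' 0 a.length).foldl
            (fun acc (t : Nat) => max acc ((t : Int) - (Lf a c k (t+1) : Int) + 1)) 0
          = (List.range' 0 a.length).foldl (fun acc (t : Nat) => max acc ((t : Int) + 1)) 0 := by
        apply foldl_congr_mem'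
        intro bb t _
        rw [hLf]
        norm_num
      rw [hcong, fold_max_succ a.length 0 le_rfl]
      rw [max_eq_right (by exact_mod_cast Nat.zero_le _)]
    · rw [if_neg hm]
      set m := (posN c a).length with hmdef
      have hmk : k.toNat < m := by omega
      have hmc : m = cntc a c a.length := posN_length c a
      apply le_antisymm
      · -- A's maximum is attained by some sentinel window of B
        apply foldl_max_le
        · exact (PySem.List.le_foldl_max_int (List.range (m - k.toNat + 1))
            (fun s => (QL a c).getD (s + k.toNat + 1) 0 - (QL a c).getD s 0 - 1) 0).1
        · intro t ht
          have htn : t < a.length := by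
            have := List.mem_range'_1.mp ht
            omega
          set s := cntc a c (t+1) - k.toNat with hsdef
          have hsle : s ≤ m - k.toNat := by
            have := cntc_le_len a c (t+1)
            omega
          have hf := Lf_formula a k c hk0 (t+1) (by omega)
          have hb := j_le_Q a k c hk0 hmk (t+1) (by omega)
          rw [← hsdef] at hf hb
          have hterm : (t : Int) - (Lf a c k (t+1) : Int) + 1
              ≤ (QL a c).getD (s + k.toNat + 1) 0 - (QL a c).getD s 0 - 1 := by
            omega
          exact le_trans hterm ((PySem.List.le_foldl_max_int (List.range (m - k.toNat + 1))
            (fun s => (QL a c).getD (s + k.toNat + 1) 0 - (QL a c).getD s 0 - 1) 0).2 s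
            (List.mem_range.mpr (by omega)))
      · -- each sentinel window of B is a window A records (or is ≤ 0)
        apply foldl_max_le
        · exact (PySem.List.le_foldl_max_int (List.range' 0 a.length)
            (fun t => (t : Int) - (Lf a c k (t+1) : Int) + 1) 0).1
        · intro s hs
          have hsr : s < m - k.toNat + 1 := List.mem_range.mp hs
          rcases le_or_gt ((QL a c).getD (s + k.toNat + 1) 0 - (QL a c).getD s 0 - 1) 0 with hneg | hpos
          · exact le_trans hneg ((PySem.List.le_foldl_max_int (List.range' 0 a.length)
              (fun t => (t : Int) - (Lf a c k (t+1) : Int) + 1) 0).1)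
          · obtain ⟨jn, hq, hjle, hcnt, hmore, hlast⟩ := QL_cnt a c (s + k.toNat + 1) (by omega) (by omega)
            have hqs : -1 ≤ (QL a c).getD s 0 := QL_ge a c s (by omega)
            rw [hq] at hpos
            have hjn1 : 1 ≤ jn := by omega
            have hsval : cntc a c jn - k.toNat = s := by omega
            have hf := Lf_formula a k c hk0 jn hjle
            rw [hsval] at hf
            have hmem : jn - 1 ∈ List.range' 0 a.length :=
              List.mem_range'_1.mpr ⟨Nat.zero_le _, by omega⟩
            have hg := (PySem.List.le_foldl_max_int (List.range' 0 a.length)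
              (fun t => (t : Int) - (Lf a c k (t+1) : Int) + 1) 0).2 (jn - 1) hmem
            have hidx : jn - 1 + 1 = jn := by omega
            rw [hidx] at hg
            rw [hq]
            omega

-- ===== VERDICT (by name: the statement is the Claim_ definition above) =====
theorem solve_spec : Claim_equal_solve := by
  intro a k c _hdom
  exact main_eq a k c
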